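-- pv_equiv track=rewrite | github.com/yun1113/WinAPI | Website/scripts/export_report.py | generte_api_count
-- ===== SOURCE A (Python) =====
-- def generte_api_count(data):
--
--     report_dict = {}
--     for item in data:
--         dll, api = item
--
--         if dll in report_dict.keys():
--             if api in report_dict[dll].keys():
--                 report_dict[dll][api] = report_dict[dll][api] + 1
--             else:
--                 report_dict[dll][api] = 1
--         else:
--             report_dict[dll] = {}
--             report_dict[dll][api] = 1
--
--     return report_dict
-- ===== SOURCE B (Python) =====
-- def generte_api_count(data):
--     # Pass 1: flat tally keyed by the (dll, api) pair, in first-appearance order.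
--     tally = {}
--     for item in data:
--         dll, api = item
--         tally[(dll, api)] = tally.get((dll, api), 0) + 1
--     # Pass 2: reshape the flat tally into the nested report.
--     report = {}
--     for (dll, api), count in tally.items():
--         report.setdefault(dll, {})[api] = count
--     return report
-- ===== Notes on version B (the rewrite author's own statement) =====
-- stated objective: alternative
-- what changed: Replaces A's single pass with interleaved membership branching on a nested dict by a tally-then-reshape decomposition: one pass counts (dll, api) pairs in a flat dict, a second pass reshapes that tally into the nested report via setdefault.
import Mathlib
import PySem

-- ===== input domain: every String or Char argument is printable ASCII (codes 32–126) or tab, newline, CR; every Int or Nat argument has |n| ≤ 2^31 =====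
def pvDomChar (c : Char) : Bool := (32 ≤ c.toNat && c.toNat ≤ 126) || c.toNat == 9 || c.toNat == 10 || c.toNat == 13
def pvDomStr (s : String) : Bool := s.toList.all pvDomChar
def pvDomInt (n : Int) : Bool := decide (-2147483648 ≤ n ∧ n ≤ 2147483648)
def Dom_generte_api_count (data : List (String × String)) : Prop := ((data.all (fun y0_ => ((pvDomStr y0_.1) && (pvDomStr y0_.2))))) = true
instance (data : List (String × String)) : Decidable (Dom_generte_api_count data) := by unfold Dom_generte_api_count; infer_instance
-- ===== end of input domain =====

-- B replaces A's single interleaved-branching pass over a nested dict by a flat (dll, api) tally pass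
-- followed by a reshape pass (objective: alternative decomposition, same cost).

-- ===== PORT A =====
def generte_api_count (data : List (String × String)) : List (String × List (String × Int)) :=
  let report := data.foldl (fun rd item =>
    let dll := item.1
    let api := item.2
    if rd.contains dll then
      let inner := rd.getD dll PySem.Dict.empty
      if inner.contains api then
        rd.insert dll (inner.insert api (inner.getD api 0 + 1))
      else
        rd.insert dll (inner.insert api 1)
    else
      rd.insert dll (PySem.Dict.empty.insert api 1))
    (PySem.Dict.empty : PySem.Dict String (PySem.Dict String Int))
  report.items.map (fun p => (p.1, p.2.items))

-- ===== PORT B =====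
def generte_api_count_alt (data : List (String × String)) : List (String × List (String × Int)) :=
  let tally := data.foldl (fun t item =>
      t.insert (item.1, item.2) (t.getD (item.1, item.2) 0 + 1))
    (PySem.Dict.empty : PySem.Dict (String × String) Int)
  let report := tally.items.foldl (fun rep p =>
      rep.insert p.1.1 ((rep.getD p.1.1 PySem.Dict.empty).insert p.1.2 p.2))
    (PySem.Dict.empty : PySem.Dict String (PySem.Dict String Int))
  report.items.map (fun p => (p.1, p.2.items))

-- ===== PRECONDITION & SPEC =====
def Spec_generte_api_count (data : List (String × String)) (out : List (String × List (String × Int))) : Prop := out = generte_api_count_alt data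
instance (data : List (String × String)) (out : List (String × List (String × Int))) : Decidable (Spec_generte_api_count data out) := by unfold Spec_generte_api_count; infer_instance

-- ===== CLAIM (what is proved, stated in full; the proofs are below) =====
def Claim_equal_generte_api_count : Prop := ∀ (data : List (String × String)), Dom_generte_api_count data → Spec_generte_api_count data (generte_api_count data)

-- ===== LEMMAS AND PROOFS =====

-- A's loop body, branches collapsed into one expression (proved equal in pvStepA_eq).
def pvNstep (rd : PySem.Dict String (PySem.Dict String Int)) (item : String × String) :
    PySem.Dict String (PySem.Dict String Int) :=
  rd.insert item.1 ((rd.getD item.1 PySem.Dict.empty).insert item.2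
    ((rd.getD item.1 PySem.Dict.empty).getD item.2 0 + 1))

-- B's reshape loop body.
def pvRstep (rep : PySem.Dict String (PySem.Dict String Int)) (p : (String × String) × Int) :
    PySem.Dict String (PySem.Dict String Int) :=
  rep.insert p.1.1 ((rep.getD p.1.1 PySem.Dict.empty).insert p.1.2 p.2)

theorem pvStepA_eq (rd : PySem.Dict String (PySem.Dict String Int)) (item : String × String) :
    (if rd.contains item.1 then
      let inner := rd.getD item.1 PySem.Dict.empty
      if inner.contains item.2 then
        rd.insert item.1 (inner.insert item.2 (inner.getD item.2 0 + 1))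
      else
        rd.insert item.1 (inner.insert item.2 1)
    else
      rd.insert item.1 (PySem.Dict.empty.insert item.2 1)) = pvNstep rd item := by
  unfold pvNstep
  by_cases h1 : rd.contains item.1 = true
  · simp only [h1, if_true]
    by_cases h2 : (rd.getD item.1 PySem.Dict.empty).contains item.2 = true
    · simp [h2]
    · simp only [Bool.not_eq_true] at h2
      simp [h2, PySem.Dict.getD_of_not_contains _ _ h2]
  · simp only [Bool.not_eq_true] at h1
    simp [h1, PySem.Dict.getD_of_not_contains _ _ h1]

theorem pv_insert_comm {κ ν : Type} [BEq κ] [LawfulBEq κ] (r : PySem.Dict κ ν) (k k' : κ)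
    (h : k ≠ k') (hc : r.contains k = true) (v w : ν) :
    (r.insert k v).insert k' w = (r.insert k' w).insert k v := by
  apply PySem.Dict.ext
  have hbne : (k' == k) = false := by simp [Ne.symm h]
  have hbne' : (k == k') = false := by simp [h]
  by_cases hc' : r.contains k' = true
  · rw [PySem.Dict.items_insert_of_contains _ w
        (by rw [PySem.Dict.contains_insert]; simp [hc']),
      PySem.Dict.items_insert_of_contains _ v hc,
      PySem.Dict.items_insert_of_contains _ v
        (by rw [PySem.Dict.contains_insert]; simp [hc]),
      PySem.Dict.items_insert_of_contains _ w hc']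
    simp only [List.map_map]
    apply List.map_congr_left
    intro p _
    simp only [Function.comp]
    by_cases hp : (p.1 == k) = true
    · have hpk' : (p.1 == k') = false := by
        have := eq_of_beq hp; simp [this, h]
      simp [hp, hpk', hbne']
    · by_cases hp' : (p.1 == k') = true
      · simp [hp, hp', hbne]
      · simp [hp, hp']
  · simp only [Bool.not_eq_true] at hc'
    rw [PySem.Dict.items_insert_of_not_contains _ w
        (by rw [PySem.Dict.contains_insert]; simp [hbne, hc']),
      PySem.Dict.items_insert_of_contains _ v hc,
      PySem.Dict.items_insert_of_contains _ v
        (by rw [PySem.Dict.contains_insert]; simp [hc]),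
      PySem.Dict.items_insert_of_not_contains _ w hc']
    simp [hbne]

theorem pvRstep_rstep_self (rep : PySem.Dict String (PySem.Dict String Int))
    (k : String × String) (c v : Int) :
    pvRstep (pvRstep rep (k, c)) (k, v) = pvRstep rep (k, v) := by
  unfold pvRstep
  simp [PySem.Dict.getD_insert_self, PySem.Dict.insert_insert_self]

theorem pvRstep_comm (rep : PySem.Dict String (PySem.Dict String Int))
    (p q : (String × String) × Int) (h : p.1 ≠ q.1)
    (hcd : rep.contains p.1.1 = true)
    (hca : (rep.getD p.1.1 PySem.Dict.empty).contains p.1.2 = true) :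
    pvRstep (pvRstep rep p) q = pvRstep (pvRstep rep q) p := by
  obtain ⟨⟨d, a⟩, v⟩ := p
  obtain ⟨⟨d', a'⟩, v'⟩ := q
  simp only at hcd hca
  unfold pvRstep
  simp only
  by_cases hd : d = d'
  · subst hd
    have ha : a ≠ a' := by
      intro hh; exact h (by simp [hh])
    rw [PySem.Dict.insert_insert_self, PySem.Dict.insert_insert_self,
      PySem.Dict.getD_insert_self, PySem.Dict.getD_insert_self]
    exact congrArg _ (pv_insert_comm _ a a' ha hca v v')
  · rw [PySem.Dict.getD_insert, if_neg (Ne.symm hd), PySem.Dict.getD_insert, if_neg hd]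
    exact pv_insert_comm rep d d' hd hcd _ _

theorem pvContains_rstep (rep : PySem.Dict String (PySem.Dict String Int))
    (q : (String × String) × Int) (d a : String)
    (hcd : rep.contains d = true)
    (hca : (rep.getD d PySem.Dict.empty).contains a = true) :
    (pvRstep rep q).contains d = true ∧
      ((pvRstep rep q).getD d PySem.Dict.empty).contains a = true := by
  obtain ⟨⟨d', a'⟩, v'⟩ := q
  unfold pvRstep
  simp only
  constructor
  · rw [PySem.Dict.contains_insert]; simp [hcd]
  · rw [PySem.Dict.getD_insert]
    by_cases hd : d = d'
    · subst hd
      rw [if_pos rfl, PySem.Dict.contains_insert]; simp [hca]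
    · rw [if_neg hd]; exact hca

theorem pvContains_rstep_self (rep : PySem.Dict String (PySem.Dict String Int))
    (p : (String × String) × Int) :
    (pvRstep rep p).contains p.1.1 = true ∧
      ((pvRstep rep p).getD p.1.1 PySem.Dict.empty).contains p.1.2 = true := by
  unfold pvRstep
  exact ⟨PySem.Dict.contains_insert_self _ _ _,
    by rw [PySem.Dict.getD_insert_self]; exact PySem.Dict.contains_insert_self _ _ _⟩

theorem pvRcomm_fold (l : List ((String × String) × Int))
    (rep : PySem.Dict String (PySem.Dict String Int)) (k : String × String) (v : Int)
    (hnot : k ∉ l.map (·.1))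
    (hcd : rep.contains k.1 = true)
    (hca : (rep.getD k.1 PySem.Dict.empty).contains k.2 = true) :
    l.foldl pvRstep (pvRstep rep (k, v)) = pvRstep (l.foldl pvRstep rep) (k, v) := by
  induction l generalizing rep with
  | nil => rfl
  | cons q rest ih =>
    simp only [List.map_cons, List.mem_cons, not_or] at hnot
    simp only [List.foldl_cons]
    rw [pvRstep_comm rep (k, v) q hnot.1 hcd hca]
    exact ih _ hnot.2 (pvContains_rstep rep q k.1 k.2 hcd hca).1
      (pvContains_rstep rep q k.1 k.2 hcd hca).2

theorem pvR2 (l : List ((String × String) × Int))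
    (rep : PySem.Dict String (PySem.Dict String Int)) (k : String × String) (v : Int)
    (hnd : (l.map (·.1)).Nodup) (hmem : k ∈ l.map (·.1)) :
    (l.map (fun p => if p.1 == k then (k, v) else p)).foldl pvRstep rep
      = pvRstep (l.foldl pvRstep rep) (k, v) := by
  induction l generalizing rep with
  | nil => simp at hmem
  | cons q rest ih =>
    simp only [List.map_cons, List.mem_cons] at hmem hnd
    rw [List.nodup_cons] at hnd
    by_cases hq : q.1 = k
    · have hknotin : k ∉ rest.map (·.1) := by
        simpa [hq] using hnd.1
      have hrest : rest.map (fun p => if p.1 == k then (k, v) else p) = rest := by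
        conv_rhs => rw [← List.map_id rest]
        apply List.map_congr_left
        intro p hp
        have : p.1 ≠ k := fun hh => hknotin (hh ▸ List.mem_map_of_mem hp)
        simp [this]
      simp only [List.map_cons, hq, beq_self_eq_true, if_pos, List.foldl_cons, hrest]
      have hqeq : q = (k, q.2) := by
        cases q; simp_all
      rw [hqeq,
        ← pvRcomm_fold rest (pvRstep rep (k, q.2)) k v hknotin
          (pvContains_rstep_self rep (k, q.2)).1
          (pvContains_rstep_self rep (k, q.2)).2,
        pvRstep_rstep_self]
    · have hmem' : k ∈ rest.map (·.1) := by
        rcases hmem with h | h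
        · exact absurd h.symm hq
        · exact h
      rw [List.map_cons, List.foldl_cons, if_neg (by simpa using hq)]
      exact ih _ hnd.2 hmem' 

theorem pvLookup_eq_none {α β : Type} [BEq α] [LawfulBEq α] (l : List (α × β)) (k : α)
    (h : k ∉ l.map (·.1)) : List.lookup k l = none := by
  induction l with
  | nil => rfl
  | cons q rest ih =>
    obtain ⟨a, b⟩ := q
    simp only [List.map_cons, List.mem_cons, not_or] at h
    have hf : (k == a) = false := by simpa using h.1
    rw [List.lookup_cons]
    simp only [hf]
    exact ih h.2

theorem pvGet?_eq_lookup {κ ν : Type} [BEq κ] [LawfulBEq κ] (d : PySem.Dict κ ν) (k : κ) :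
    d.get? k = List.lookup k d.items := by
  obtain ⟨l⟩ := d
  induction l with
  | nil => rfl
  | cons q rest ih =>
    obtain ⟨a, b⟩ := q
    rw [PySem.Dict.get?_mk_cons, List.lookup_cons]
    by_cases h : a = k
    · subst h; simp
    · have h1 : (a == k) = false := by simpa using h
      have h2 : (k == a) = false := by simpa using Ne.symm h
      simp only [h1, h2]
      simpa using ih

theorem pvL (l : List ((String × String) × Int))
    (rep : PySem.Dict String (PySem.Dict String Int)) (d a : String)
    (hnd : (l.map (·.1)).Nodup) :
    ((l.foldl pvRstep rep).getD d PySem.Dict.empty).getD a 0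
      = (List.lookup (d, a) l).getD ((rep.getD d PySem.Dict.empty).getD a 0) := by
  induction l generalizing rep with
  | nil => rfl
  | cons q rest ih =>
    obtain ⟨⟨d1, a1⟩, c⟩ := q
    simp only [List.map_cons] at hnd
    rw [List.nodup_cons] at hnd
    have hbase : ((pvRstep rep ((d1, a1), c)).getD d PySem.Dict.empty).getD a 0
        = if (d, a) = (d1, a1) then c
          else (rep.getD d PySem.Dict.empty).getD a 0 := by
      unfold pvRstep
      simp only
      rw [PySem.Dict.getD_insert]
      by_cases hd : d = d1
      · subst hd
        rw [if_pos rfl, PySem.Dict.getD_insert]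
        by_cases ha : a = a1
        · subst ha; simp
        · simp [ha]
      · rw [if_neg hd, if_neg (by simp [hd])]
    rw [List.foldl_cons, ih _ hnd.2, hbase, List.lookup_cons]
    by_cases hk : (d, a) = (d1, a1)
    · rw [if_pos hk]
      have hb : ((d, a) == (d1, a1)) = true := by simpa using hk
      have hnone : List.lookup (d, a) rest = none := by
        apply pvLookup_eq_none
        rw [hk]
        exact hnd.1
      simp [hb, hnone]
    · rw [if_neg hk]
      have : ((d, a) == (d1, a1)) = false := by simpa using hk
      simp [this]

theorem pvMain (data : List (String × String)) :
    data.foldl pvNstep PySem.Dict.empty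
      = (PySem.Dict.counter data).items.foldl pvRstep PySem.Dict.empty := by
  induction data using List.reverseRecOn with
  | nil => rfl
  | append_singleton data k ih =>
    obtain ⟨kd, ka⟩ := k
    rw [List.foldl_append, List.foldl_cons, List.foldl_nil, PySem.Dict.counter_append_singleton]
    have hmod : (PySem.Dict.counter data).modify (kd, ka) 0 (fun x => x + 1)
        = (PySem.Dict.counter data).insert (kd, ka)
            ((PySem.Dict.counter data).getD (kd, ka) 0 + 1) := rfl
    rw [hmod]
    set t := PySem.Dict.counter data with ht
    have hnd : (t.items.map (·.1)).Nodup := PySem.Dict.nodup_keys_counter data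
    have hfold : (t.insert (kd, ka) (t.getD (kd, ka) 0 + 1)).items.foldl pvRstep PySem.Dict.empty
        = pvRstep (t.items.foldl pvRstep PySem.Dict.empty) ((kd, ka), t.getD (kd, ka) 0 + 1) := by
      by_cases hc : t.contains (kd, ka) = true
      · rw [PySem.Dict.items_insert_of_contains _ _ hc]
        exact pvR2 _ _ _ _ hnd ((PySem.Dict.contains_iff_mem_keys t (kd, ka)).mp hc)
      · rw [PySem.Dict.items_insert_of_not_contains _ _ (by simpa using hc),
          List.foldl_append, List.foldl_cons, List.foldl_nil]
    rw [hfold, ← ih]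
    have hlook : ((data.foldl pvNstep PySem.Dict.empty).getD kd PySem.Dict.empty).getD ka 0
        = t.getD (kd, ka) 0 := by
      have e1 : (((PySem.Dict.empty : PySem.Dict String (PySem.Dict String Int))).getD kd
          PySem.Dict.empty).getD ka 0 = 0 := by
        rw [PySem.Dict.getD_empty, PySem.Dict.getD_empty]
      rw [ih, pvL _ _ _ _ hnd, e1, PySem.Dict.getD_eq_get?_getD, pvGet?_eq_lookup]
    have hstep : pvNstep (data.foldl pvNstep PySem.Dict.empty) (kd, ka)
        = pvRstep (data.foldl pvNstep PySem.Dict.empty)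
            ((kd, ka), ((data.foldl pvNstep PySem.Dict.empty).getD kd
              PySem.Dict.empty).getD ka 0 + 1) := rfl
    rw [hstep, hlook]

-- ===== VERDICT (by name: the statement is the Claim_ definition above) =====
theorem generte_api_count_spec : Claim_equal_generte_api_count := by
  intro data _
  unfold Spec_generte_api_count generte_api_count generte_api_count_alt
  have hA : (fun (rd : PySem.Dict String (PySem.Dict String Int)) (item : String × String) =>
      let dll := item.1
      let api := item.2
      if rd.contains dll then
        let inner := rd.getD dll PySem.Dict.empty
        if inner.contains api then
          rd.insert dll (inner.insert api (inner.getD api 0 + 1))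
        else
          rd.insert dll (inner.insert api 1)
      else
        rd.insert dll (PySem.Dict.empty.insert api 1)) = pvNstep :=
    funext fun rd => funext fun item => pvStepA_eq rd item
  have hT : (fun (t : PySem.Dict (String × String) Int) (item : String × String) =>
      t.insert (item.1, item.2) (t.getD (item.1, item.2) 0 + 1))
      = (fun (d : PySem.Dict (String × String) Int) (x : String × String) =>
          d.insert x (d.getD x 0 + 1)) := rfl
  have hdict : data.foldl pvNstep PySem.Dict.empty
      = ((data.foldl (fun (t : PySem.Dict (String × String) Int) (item : String × String) =>
            t.insert (item.1, item.2) (t.getD (item.1, item.2) 0 + 1))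
          PySem.Dict.empty).items).foldl pvRstep PySem.Dict.empty := by
    rw [congrArg (fun g => List.foldl g (PySem.Dict.empty : PySem.Dict (String × String) Int) data) hT,
      PySem.Dict.foldl_insert_getD_add_one_eq_counter]
    exact pvMain data
  simp only
  rw [congrArg (fun g => List.foldl g
      (PySem.Dict.empty : PySem.Dict String (PySem.Dict String Int)) data) hA, hdict]
  rfl
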